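-- pv_equiv track=rewrite | github.com/vinciliba/QuarterlyReport | reporting/quarterly_report/report_utils/invoices_builder.py | determine_po_category
-- ===== SOURCE A (Python) =====
-- def determine_po_category(row):
--     """Determine purchase order category from instrument or topic"""
--     CALLS_TYPES_LIST = ['STG', 'ADG', 'POC', 'COG', 'SYG', 'StG', 'CoG', 'AdG', 'SyG', 'PoC', 'CSA']
--
--     instrument = str(row.get('Instrument', '')).strip()
--     topic = str(row.get('Topic', '')).strip()
--
--     try:
--         if topic and any(call_type in topic for call_type in CALLS_TYPES_LIST):
--             category = next(call_type for call_type in CALLS_TYPES_LIST if call_type in topic).upper()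
--             return category
--         elif instrument and any(call_type in instrument for call_type in CALLS_TYPES_LIST):
--             category = next(call_type for call_type in CALLS_TYPES_LIST if call_type in instrument).upper()
--             return category
--         return ''
--     except Exception as e:
--         raise
-- ===== SOURCE B (Python) =====
-- def determine_po_category(row):
--     """Determine purchase order category from instrument or topic"""
--     CALLS_TYPES_LIST = ['STG', 'ADG', 'POC', 'COG', 'SYG', 'StG', 'CoG', 'AdG', 'SyG', 'PoC', 'CSA']
--     # every call type has length 3, so "ct in text" is exactly "ct is a 3-gram of text"
--     for key in ('Topic', 'Instrument'):
--         text = str(row.get(key, '')).strip()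
--         if text:
--             grams = set(text[i:i + 3] for i in range(len(text) - 2))
--             for call_type in CALLS_TYPES_LIST:
--                 if call_type in grams:
--                     return call_type.upper()
--     return ''
-- ===== Notes on version B (the rewrite author's own statement) =====
-- stated objective: alternative
-- what changed: Instead of A's two elif branches each running substring scans over the text (any()+next() per branch), B precomputes in one pass the set of all 3-character substrings of each non-empty text and then answers each call-type query by a hash-set membership lookup, correct because every call type has length 3.
import Mathlib
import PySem

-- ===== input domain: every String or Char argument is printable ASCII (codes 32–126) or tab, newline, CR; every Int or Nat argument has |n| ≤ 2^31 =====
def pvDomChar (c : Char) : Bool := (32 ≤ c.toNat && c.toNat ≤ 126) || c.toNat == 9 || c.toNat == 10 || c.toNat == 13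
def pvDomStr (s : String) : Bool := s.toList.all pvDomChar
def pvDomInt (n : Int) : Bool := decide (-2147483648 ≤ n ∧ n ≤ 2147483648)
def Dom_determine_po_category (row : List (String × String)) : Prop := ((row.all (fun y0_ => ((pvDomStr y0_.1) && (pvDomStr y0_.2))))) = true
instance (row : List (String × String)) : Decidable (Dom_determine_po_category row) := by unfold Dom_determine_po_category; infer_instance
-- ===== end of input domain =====

-- B change (objective "alternative"): B precomputes the set of 3-character substrings of each
-- non-empty text once and answers each call-type query by set membership (every call type has
-- length 3), replacing A's per-call-type substring scans in two elif branches.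

-- the shared literal constant CALLS_TYPES_LIST (identical in both Pythons)
def pvCalls : List String :=
  ["STG", "ADG", "POC", "COG", "SYG", "StG", "CoG", "AdG", "SyG", "PoC", "CSA"]

-- ===== PORT A =====
def determine_po_category (row : List (String × String)) : String :=
  let instrument := PySem.Str.strip ((PySem.Dict.mk row).getD "Instrument" "")
  let topic := PySem.Str.strip ((PySem.Dict.mk row).getD "Topic" "")
  if topic ≠ "" ∧ pvCalls.any (fun ct => PySem.Str.isIn ct topic) then
    -- next(...): first element of the list satisfying the predicate; guarded by any, so some
    match pvCalls.find? (fun ct => PySem.Str.isIn ct topic) with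
    | some ct => PySem.Str.upper ct
    | none => ""      -- unreachable (guarded by the `any` above)
  else if instrument ≠ "" ∧ pvCalls.any (fun ct => PySem.Str.isIn ct instrument) then
    match pvCalls.find? (fun ct => PySem.Str.isIn ct instrument) with
    | some ct => PySem.Str.upper ct
    | none => ""      -- unreachable
  else ""

-- ===== PORT B =====
-- grams = set(text[i:i+3] for i in range(len(text) - 2))
def pvGrams (t : String) : PySem.Set String :=
  PySem.Set.ofList
    ((PySem.List.pyRange 0 ((PySem.Str.len t : Int) - 2) 1).map
      (fun i => PySem.Str.slice t (some i) (some (i + 3))))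

-- inner `for call_type in CALLS_TYPES_LIST: if call_type in grams: return ...`
def pvFindIn (grams : PySem.Set String) : List String → Option String
  | [] => none
  | ct :: cts => if PySem.Set.contains grams ct then some ct else pvFindIn grams cts

-- outer `for key in ('Topic', 'Instrument')`
def pvKeyLoop (row : PySem.Dict String String) : List String → String
  | [] => ""
  | k :: rest =>
    let text := PySem.Str.strip (row.getD k "")
    if text = "" then pvKeyLoop row rest
    else
      match pvFindIn (pvGrams text) pvCalls with
      | some ct => PySem.Str.upper ct
      | none => pvKeyLoop row rest

def determine_po_category_alt (row : List (String × String)) : String :=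
  pvKeyLoop (PySem.Dict.mk row) ["Topic", "Instrument"]

-- ===== PRECONDITION & SPEC =====
def Spec_determine_po_category (row : List (String × String)) (out : String) : Prop := out = determine_po_category_alt row
instance (row : List (String × String)) (out : String) : Decidable (Spec_determine_po_category row out) := by unfold Spec_determine_po_category; infer_instance

-- ===== CLAIM (what is proved, stated in full; the proofs are below) =====
def Claim_equal_determine_po_category : Prop := ∀ (row : List (String × String)), Dom_determine_po_category row → Spec_determine_po_category row (determine_po_category row)

-- ===== LEMMAS AND PROOFS =====

-- membership in the 3-gram set is exactly the substring test, for a pattern of length 3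
theorem pv_mem_grams (ct t : String) (h3 : ct.toList.length = 3) :
    ct ∈ pvGrams t ↔ PySem.Str.isIn ct t = true := by
  unfold pvGrams
  rw [PySem.Set.mem_ofList, List.mem_map]
  have hlen : PySem.Str.len t = (t.toList.length : Int) := by simp [PySem.Str.len_eq]
  rw [show PySem.Str.isIn ct t = PySem.Chars.isIn ct.toList t.toList from by simp,
      ← PySem.Chars.exists_prefix_drop_iff_isIn]
  constructor
  · rintro ⟨i, hi, hsl⟩
    rw [PySem.List.mem_pyRange_one] at hi
    refine ⟨i.toNat, ?_⟩
    have h0 : (0:Int) ≤ i := hi.1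
    have ht : (PySem.Str.slice t (some i) (some (i + 3))).toList
        = (t.toList.drop i.toNat).take 3 := by
      simp only [PySem.Str.toList_slice, PySem.Chars.slice_eq_listSlice]
      rw [PySem.List.slice_toNat _ h0 (by omega)]
      congr 1
      omega
    rw [← hsl, ht]
    exact List.take_prefix _ _
  · rintro ⟨j, hpre⟩
    have hL : t.toList.length = t.length := by simp
    have hjl : j + 3 ≤ t.length := by
      have := hpre.length_le
      simp [h3] at this
      omega
    refine ⟨(j : Int), ?_, ?_⟩
    · rw [PySem.List.mem_pyRange_one]
      constructor
      · exact_mod_cast Nat.zero_le j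
      · rw [hlen]; omega
    · apply String.toList_inj.mp
      simp only [PySem.Str.toList_slice, PySem.Chars.slice_eq_listSlice]
      rw [PySem.List.slice_toNat _ (by positivity) (by positivity)]
      have h4 : ((j:Int) + 3).toNat - ((j:Int)).toNat = 3 := by omega
      rw [h4, Int.toNat_natCast]
      have := List.prefix_iff_eq_take.mp hpre
      rw [h3] at this
      exact this.symm

theorem pv_findIn_eq (t : String) (l : List String)
    (hl : ∀ ct ∈ l, ct.toList.length = 3) :
    pvFindIn (pvGrams t) l = l.find? (fun ct => PySem.Str.isIn ct t) := by
  induction l with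
  | nil => rfl
  | cons ct cts ih =>
    have h := pv_mem_grams ct t (hl ct (by simp))
    have ih' := ih (fun x hx => hl x (List.mem_cons_of_mem _ hx))
    by_cases hc : PySem.Str.isIn ct t = true
    · have hmem : ct ∈ pvGrams t := h.mpr hc
      have hcc : PySem.Chars.isIn ct.toList t.toList = true := by simpa using hc
      simp [pvFindIn, List.find?, hmem, hcc]
    · have hmem : ct ∉ pvGrams t := fun hm => hc (h.mp hm)
      have hcc : PySem.Chars.isIn ct.toList t.toList = false := by simpa using hc
      simp [pvFindIn, List.find?, hmem, hcc, ih']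

theorem pv_any_eq_isSome {α : Type} (p : α → Bool) (l : List α) :
    l.any p = (l.find? p).isSome := by
  induction l with
  | nil => simp
  | cons x xs ih =>
    by_cases h : p x <;> simp [List.find?, h, ih]

theorem pv_calls_len3 : ∀ ct ∈ pvCalls, ct.toList.length = 3 := by decide

theorem pvKeyLoop_nil (d : PySem.Dict String String) : pvKeyLoop d [] = "" := rfl

theorem pvKeyLoop_cons (d : PySem.Dict String String) (k : String) (rest : List String) :
    pvKeyLoop d (k :: rest) =
      (if PySem.Str.strip (d.getD k "") = "" then pvKeyLoop d rest
       else match pvFindIn (pvGrams (PySem.Str.strip (d.getD k ""))) pvCalls with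
            | some ct => PySem.Str.upper ct
            | none => pvKeyLoop d rest) := rfl

-- ===== VERDICT (by name: the statement is the Claim_ definition above) =====
theorem determine_po_category_spec : Claim_equal_determine_po_category := by
  intro row _
  unfold Spec_determine_po_category determine_po_category determine_po_category_alt
  rw [pvKeyLoop_cons, pvKeyLoop_cons, pvKeyLoop_nil]
  rw [pv_findIn_eq _ _ pv_calls_len3, pv_findIn_eq _ _ pv_calls_len3]
  set t := PySem.Str.strip ((PySem.Dict.mk row).getD "Topic" "") with ht
  set i := PySem.Str.strip ((PySem.Dict.mk row).getD "Instrument" "") with hi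
  by_cases hT : t = ""
  · simp only [hT, ne_eq, not_true_eq_false, false_and, if_false, if_true]
    by_cases hI : i = ""
    · simp [hI]
    · rcases hf : pvCalls.find? (fun ct => PySem.Str.isIn ct i) with _ | ct
      · simp [hI]
      · have h2 : pvCalls.any (fun ct => PySem.Str.isIn ct i) = true := by
          rw [pv_any_eq_isSome, hf]; rfl
        simp only [hI, not_false_eq_true, h2, and_self, if_true]
        simp
  · simp only [if_neg hT]
    rcases hf : pvCalls.find? (fun ct => PySem.Str.isIn ct t) with _ | ct
    · have hA : pvCalls.any (fun ct => PySem.Str.isIn ct t) = false := by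
        rw [pv_any_eq_isSome, hf]; rfl
      simp only [hA]
      by_cases hI : i = ""
      · simp [hI]
      · rcases hg : pvCalls.find? (fun ct => PySem.Str.isIn ct i) with _ | ct
        · simp [hI]
        · have h2 : pvCalls.any (fun ct => PySem.Str.isIn ct i) = true := by
            rw [pv_any_eq_isSome, hg]; rfl
          simp only [ne_eq, hI, not_false_eq_true, h2, and_self, if_true]
          simp
    · have hA : pvCalls.any (fun ct => PySem.Str.isIn ct t) = true := by
        rw [pv_any_eq_isSome, hf]; rfl
      simp only [ne_eq, hT, not_false_eq_true, hA, and_self, if_true]
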